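-- pv_equiv track=rewrite | github.com/SaiSatishSuravazula/Algorithms | Randomization/Permute_by_Sorting.py | Sort_Permute
-- ===== SOURCE A (Python) =====
-- def Sort_Permute(arr, new_list):
--
--     index_mapping = {}
--
--     sorted_new_list = sorted(new_list)
--
--     index = 0
--     for value in sorted_new_list:
--         index_mapping[value] = index
--         index += 1
--
--     permuted_arr = [0] * len(arr)
--
--     for i in range(len(new_list)):
--         original_value = arr[i]
--         position = index_mapping[new_list[i]]
--         permuted_arr[position] = original_value
--
--     return permuted_arr
-- ===== SOURCE B (Python) =====
-- def Sort_Permute(arr, new_list):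
--     # Rank by binary search: position of arr[i] is bisect_right(sorted, v) - 1,
--     # i.e. (# elements <= v) - 1, which is the last sorted index A's dict stores.
--     s = sorted(new_list)
--     permuted_arr = [0] * len(arr)
--     for i in range(len(new_list)):
--         v = new_list[i]
--         lo, hi = 0, len(s)
--         while lo < hi:
--             mid = (lo + hi) // 2
--             if s[mid] <= v:
--                 lo = mid + 1
--             else:
--                 hi = mid
--         permuted_arr[lo - 1] = arr[i]
--     return permuted_arr
-- ===== Notes on version B (the rewrite author's own statement) =====
-- stated objective: alternative
-- what changed: Replaces A's enumerating index dictionary with a per-element binary search on the sorted copy: the target position is (# elements <= v) - 1, the last sorted index that A's dict stores (duplicates included), so no dictionary is built.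
import Mathlib
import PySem

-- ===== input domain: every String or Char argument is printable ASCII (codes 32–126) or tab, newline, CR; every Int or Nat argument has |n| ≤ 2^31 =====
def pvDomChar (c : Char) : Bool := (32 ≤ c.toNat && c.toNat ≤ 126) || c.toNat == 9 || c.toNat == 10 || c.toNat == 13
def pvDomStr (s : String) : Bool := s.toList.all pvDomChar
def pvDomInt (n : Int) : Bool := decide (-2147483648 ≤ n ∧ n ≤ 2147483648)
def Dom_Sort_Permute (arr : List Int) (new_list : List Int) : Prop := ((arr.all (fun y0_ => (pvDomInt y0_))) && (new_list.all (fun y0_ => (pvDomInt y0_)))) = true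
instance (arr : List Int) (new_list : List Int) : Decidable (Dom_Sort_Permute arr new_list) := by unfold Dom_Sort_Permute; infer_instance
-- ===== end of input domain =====

-- B replaces A's sort + index dictionary with a direct rank count (position = #{x <= v} - 1): alternative algorithm, same results.


-- ===== PORT A =====
def Sort_Permute (arr : List Int) (new_list : List Int) : List Int :=
  let sorted_new_list := PySem.List.sorted new_list (fun x => x) false
  let st := sorted_new_list.foldl
    (fun (st : PySem.Dict Int Int × Int) value => (st.1.insert value st.2, st.2 + 1))
    (PySem.Dict.empty, 0)
  let index_mapping := st.1
  (PySem.List.pyRange 0 (PySem.List.len new_list) 1).foldl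
    (fun permuted_arr i =>
      let original_value := PySem.List.pyGetD arr i 0          -- arr[i]; Pre_ keeps i in range
      let position := index_mapping.getD (PySem.List.pyGetD new_list i 0) 0  -- key always present
      PySem.List.pySetD permuted_arr position original_value)
    (List.replicate arr.length 0)

-- ===== PORT B =====
-- B's hand-written binary-search loop (lo, hi as in Source B; s[mid] is in range while lo < hi ≤ len s)
def pvBisect (s : List Int) (v : Int) (lo hi : Nat) : Nat :=
  if _h : lo < hi then
    let mid := (lo + hi) / 2
    if s.getD mid 0 ≤ v then pvBisect s v (mid + 1) hi
    else pvBisect s v lo mid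
  else lo
termination_by hi - lo
decreasing_by all_goals omega

def Sort_Permute_alt (arr : List Int) (new_list : List Int) : List Int :=
  let s := PySem.List.sorted new_list (fun x => x) false
  (PySem.List.pyRange 0 (PySem.List.len new_list) 1).foldl
    (fun permuted_arr i =>
      let v := PySem.List.pyGetD new_list i 0
      let lo := pvBisect s v 0 s.length
      PySem.List.pySetD permuted_arr ((lo : Int) - 1) (PySem.List.pyGetD arr i 0))
    (List.replicate arr.length 0)

-- ===== PRECONDITION & SPEC =====
-- A raises IndexError (arr[i]) exactly when new_list is longer than arr.
def Pre_Sort_Permute (arr : List Int) (new_list : List Int) : Prop :=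
  new_list.length ≤ arr.length
instance (arr : List Int) (new_list : List Int) : Decidable (Pre_Sort_Permute arr new_list) := by
  unfold Pre_Sort_Permute; infer_instance
def pvWitness_Sort_Permute : List Int × List Int := ([10, 20, 30], [2, 1, 2])

def Spec_Sort_Permute (arr : List Int) (new_list : List Int) (out : List Int) : Prop := out = Sort_Permute_alt arr new_list
instance (arr : List Int) (new_list : List Int) (out : List Int) : Decidable (Spec_Sort_Permute arr new_list out) := by unfold Spec_Sort_Permute; infer_instance

-- ===== CLAIM (what is proved, stated in full; the proofs are below) =====
def Claim_equal_Sort_Permute : Prop := ∀ (arr : List Int) (new_list : List Int), Dom_Sort_Permute arr new_list → Pre_Sort_Permute arr new_list → Spec_Sort_Permute arr new_list (Sort_Permute arr new_list)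

-- ===== LEMMAS AND PROOFS =====

-- The enumerating insert loop A runs over the sorted list.
def pvIns (st : PySem.Dict Int Int × Int) (value : Int) : PySem.Dict Int Int × Int :=
  (st.1.insert value st.2, st.2 + 1)

theorem pvIns_getD_not_mem (s : List Int) (v : Int) (hv : v ∉ s)
    (d : PySem.Dict Int Int) (k : Int) :
    (s.foldl pvIns (d, k)).1.getD v 0 = d.getD v 0 := by
  induction s generalizing d k with
  | nil => rfl
  | cons a t ih =>
    simp only [List.foldl_cons, pvIns]
    simp only [List.mem_cons, not_or] at hv
    rw [ih hv.2]
    rw [PySem.Dict.getD_insert]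
    simp [hv.1]

-- On a sorted list s containing v, the dictionary A builds maps v to its LAST index in s,
-- which is (count of elements ≤ v) - 1 (offset by the starting index k).
theorem pvIns_getD_mem (s : List Int) (hs : s.Pairwise (· ≤ ·)) (v : Int) (hv : v ∈ s)
    (d : PySem.Dict Int Int) (k : Int) :
    (s.foldl pvIns (d, k)).1.getD v 0 = k + (s.countP (fun x => x ≤ v) : Int) - 1 := by
  induction s generalizing d k with
  | nil => simp at hv
  | cons a t ih =>
    simp only [List.foldl_cons, pvIns]
    rcases List.pairwise_cons.mp hs with ⟨ha, ht⟩
    by_cases hvt : v ∈ t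
    · rw [ih ht hvt]
      have : a ≤ v := ha v hvt
      simp [this]
      omega
    · have hva : v = a := (List.mem_cons.mp hv).resolve_right hvt
      subst hva
      rw [pvIns_getD_not_mem t v hvt]
      rw [PySem.Dict.getD_insert]
      simp only [ite_true]
      have hcount : t.countP (fun x => x ≤ v) = 0 := by
        rw [List.countP_eq_zero]
        intro x hx
        simp only [decide_eq_true_eq]
        intro hxle
        exact hvt (le_antisymm (ha x hx) hxle ▸ hx)
      simp [hcount]

-- A's dictionary lookup equals B's rank count, for any v ∈ new_list.
theorem pvMapping_eq (new_list : List Int) (v : Int) (hv : v ∈ new_list) :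
    ((PySem.List.sorted new_list (fun x => x) false).foldl pvIns (PySem.Dict.empty, 0)).1.getD v 0
      = (new_list.countP (fun x => x ≤ v) : Int) - 1 := by
  have hperm := PySem.List.sorted_perm new_list (fun x => x) false
  have hv' : v ∈ PySem.List.sorted new_list (fun x => x) false := by
    exact (hperm.mem_iff).mpr hv
  have hs : (PySem.List.sorted new_list (fun x => x) false).Pairwise (· ≤ ·) := by
    simpa using PySem.List.sorted_pairwise new_list (fun x => x)
  rw [pvIns_getD_mem _ hs v hv']
  rw [hperm.countP_eq]
  omega

-- B's binary search on a sorted list computes the count of elements ≤ v.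
theorem pvBisect_inv (s : List Int) (hs : s.Pairwise (· ≤ ·)) (v : Int) (lo hi : Nat)
    (hlh : lo ≤ hi) (hhi : hi ≤ s.length)
    (hlow : ∀ j, (h : j < s.length) → j < lo → s[j] ≤ v)
    (hhigh : ∀ j, (h : j < s.length) → hi ≤ j → v < s[j]) :
    pvBisect s v lo hi = s.countP (fun x => x ≤ v) := by
  have mono : ∀ p q, (hpq : p ≤ q) → (hq : q < s.length) → s[p]'(Nat.lt_of_le_of_lt hpq hq) ≤ s[q] := by
    intro p q hpq hq
    rcases Nat.lt_or_ge p q with hlt | hge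
    · exact (List.pairwise_iff_getElem.mp hs) p q (by omega) hq hlt
    · have : p = q := by omega
      subst this; exact le_refl _
  rw [pvBisect]
  split
  case isTrue h =>
    simp only []
    by_cases hc : s.getD ((lo + hi) / 2) 0 ≤ v
    · rw [if_pos hc]
      refine pvBisect_inv s hs v ((lo + hi) / 2 + 1) hi (by omega) hhi ?_ hhigh
      intro j hj hjlt
      calc s[j] ≤ s[(lo + hi) / 2] := mono j _ (by omega) (by omega)
        _ = s.getD ((lo + hi) / 2) 0 := (List.getD_eq_getElem s 0 (by omega)).symm
        _ ≤ v := hc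
    · rw [if_neg hc]
      refine pvBisect_inv s hs v lo ((lo + hi) / 2) (by omega) (by omega) hlow ?_
      intro j hj hjge
      calc v < s.getD ((lo + hi) / 2) 0 := lt_of_not_ge hc
        _ = s[(lo + hi) / 2] := List.getD_eq_getElem s 0 (by omega)
        _ ≤ s[j] := mono _ j hjge hj
  case isFalse h =>
    have hleq : lo = hi := by omega
    subst hleq
    have hsplit : s = s.take lo ++ s.drop lo := (List.take_append_drop lo s).symm
    rw [hsplit, List.countP_append]
    have h1 : (s.take lo).countP (fun x => x ≤ v) = lo := by
      rw [List.countP_eq_length.mpr, List.length_take_of_le hhi]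
      intro x hx
      rcases List.mem_iff_getElem.mp hx with ⟨j, hj, rfl⟩
      have hj' : j < lo := by simpa [List.length_take_of_le hhi] using hj
      rw [List.getElem_take]
      simpa using hlow j (by omega) hj'
    have h2 : (s.drop lo).countP (fun x => x ≤ v) = 0 := by
      rw [List.countP_eq_zero]
      intro x hx
      rcases List.mem_iff_getElem.mp hx with ⟨j, hj, rfl⟩
      rw [List.getElem_drop]
      simpa using not_le.mpr (hhigh (lo + j) (by simp at hj; omega) (by omega))
    omega
termination_by hi - lo
decreasing_by all_goals omega

-- ===== VERDICT (by name: the statement is the Claim_ definition above) =====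
theorem Sort_Permute_spec : Claim_equal_Sort_Permute := by
  intro arr new_list _ _
  unfold Spec_Sort_Permute Sort_Permute Sort_Permute_alt
  simp only []
  apply PySem.List.foldl_congr_mem
  intro acc i hi
  have hmem : PySem.List.pyGetD new_list i 0 ∈ new_list := by
    apply PySem.List.pyGetD_mem
    have := (PySem.List.mem_pyRange_one).mp hi
    simp [PySem.Raise.InRange] at this ⊢
    omega
  rw [show ((PySem.List.sorted new_list (fun x => x) false).foldl
      (fun (st : PySem.Dict Int Int × Int) value => (st.1.insert value st.2, st.2 + 1))
      (PySem.Dict.empty, 0)) = (PySem.List.sorted new_list (fun x => x) false).foldl pvIns (PySem.Dict.empty, 0) from rfl]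
  rw [pvMapping_eq new_list _ hmem]
  have hs : (PySem.List.sorted new_list (fun x => x) false).Pairwise (· ≤ ·) := by
    simpa using PySem.List.sorted_pairwise new_list (fun x => x)
  rw [pvBisect_inv _ hs _ 0 _ (by omega) (le_refl _) (by omega) (by omega)]
  rw [(PySem.List.sorted_perm new_list (fun x => x) false).countP_eq]
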